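-- pv_equiv track=rewrite | github.com/GXVJS/Practics | PR7/main.py | divides_by_all_digits
-- ===== SOURCE A (Python) =====
-- def divides_by_all_digits(n):
--     """Проверяет, делится ли число на каждую из своих цифр"""
--     original_n = n
--     while n > 0:
--         digit = n % 10
--         if digit == 0 or original_n % digit != 0:
--             return False
--         n //= 10
--     return True
-- ===== SOURCE B (Python) =====
-- def _gcd(a, b):
--     return a if b == 0 else _gcd(b, a % b)
--
--
-- def divides_by_all_digits(n):
--     """Проверяет, делится ли число на каждую из своих цифр"""
--     if n <= 0:
--         return True
--     digits = []
--     m = n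
--     while m > 0:
--         digits.append(m % 10)
--         m //= 10
--     if 0 in digits:
--         return False
--     lcm = 1
--     for d in digits:
--         lcm = lcm * d // _gcd(lcm, d)
--     return n % lcm == 0
-- ===== Notes on version B (the rewrite author's own statement) =====
-- stated objective: alternative
-- what changed: B collects the digits, rejects a zero digit up front, folds the digits into their least common multiple via Euclid's gcd, and performs one final n % lcm == 0 check instead of A's one modulus test per digit.
import Mathlib
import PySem

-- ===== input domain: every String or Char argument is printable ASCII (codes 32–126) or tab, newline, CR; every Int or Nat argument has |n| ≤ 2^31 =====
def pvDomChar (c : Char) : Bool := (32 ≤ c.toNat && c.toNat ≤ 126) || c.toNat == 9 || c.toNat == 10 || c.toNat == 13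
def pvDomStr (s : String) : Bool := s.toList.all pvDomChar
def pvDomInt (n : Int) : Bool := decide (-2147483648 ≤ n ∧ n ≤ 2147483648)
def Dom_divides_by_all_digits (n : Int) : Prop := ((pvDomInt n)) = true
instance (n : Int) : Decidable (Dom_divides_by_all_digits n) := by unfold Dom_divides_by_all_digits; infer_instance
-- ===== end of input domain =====

-- B replaces A's per-digit modulus test by a different decomposition: collect the digits,
-- fold them into their lcm via Euclid's gcd, and test n % lcm == 0 once at the end.

-- ===== PORT A =====
-- while n > 0: digit = n % 10; if digit == 0 or original_n % digit != 0: return False; n //= 10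
def dbadLoop (orig : Int) (n : Int) : Bool :=
  if 0 < n then
    let digit := PySem.Int.mod n 10
    if digit = 0 ∨ PySem.Int.mod orig digit ≠ 0 then false
    else dbadLoop orig (PySem.Int.floordiv n 10)
  else true
termination_by n.toNat
decreasing_by
  rw [PySem.Int.floordiv_eq_ediv_of_pos (by norm_num)]
  omega

def divides_by_all_digits (n : Int) : Bool := dbadLoop n n

-- ===== PORT B =====
-- while m > 0: digits.append(m % 10); m //= 10
def dbadDigits (m : Int) (acc : List Int) : List Int :=
  if 0 < m then dbadDigits (PySem.Int.floordiv m 10) (acc ++ [PySem.Int.mod m 10]) else acc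
termination_by m.toNat
decreasing_by
  rw [PySem.Int.floordiv_eq_ediv_of_pos (by norm_num)]
  omega

-- def _gcd(a, b): return a if b == 0 else _gcd(b, a % b)
def dbadGcd (a : Int) (b : Int) : Int :=
  if hb : b = 0 then a else dbadGcd b (PySem.Int.mod a b)
termination_by b.natAbs
decreasing_by
  rcases lt_trichotomy b 0 with h | h | h
  · have := PySem.Int.mod_neg_bounds a h; omega
  · exact absurd h hb
  · have h1 := PySem.Int.mod_nonneg a h
    have h2 := PySem.Int.mod_lt a h
    omega

def divides_by_all_digits_alt (n : Int) : Bool :=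
  if n ≤ 0 then true
  else
    let digits := dbadDigits n []
    if digits.contains 0 then false
    else
      let lcm := digits.foldl (fun l d => PySem.Int.floordiv (l * d) (dbadGcd l d)) 1
      PySem.Int.mod n lcm == 0

-- ===== PRECONDITION & SPEC =====
def Spec_divides_by_all_digits (n : Int) (out : Bool) : Prop := out = divides_by_all_digits_alt n
instance (n : Int) (out : Bool) : Decidable (Spec_divides_by_all_digits n out) := by unfold Spec_divides_by_all_digits; infer_instance

-- ===== CLAIM (what is proved, stated in full; the proofs are below) =====
def Claim_equal_divides_by_all_digits : Prop := ∀ (n : Int), Dom_divides_by_all_digits n → Spec_divides_by_all_digits n (divides_by_all_digits n)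

-- ===== LEMMAS AND PROOFS =====

-- Proof-side clean digit list of m (least-significant first).
def digitsOf (m : Int) : List Int :=
  if 0 < m then PySem.Int.mod m 10 :: digitsOf (PySem.Int.floordiv m 10) else []
termination_by m.toNat
decreasing_by
  rw [PySem.Int.floordiv_eq_ediv_of_pos (by norm_num)]
  omega

theorem dbadDigits_eq (m : Int) (acc : List Int) : dbadDigits m acc = acc ++ digitsOf m := by
  fun_induction dbadDigits m acc with
  | case1 m acc h ih =>
    rw [digitsOf]
    simp only [h, if_pos]
    rw [ih]
    simp
  | case2 m acc h =>
    rw [digitsOf]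
    simp [h]

theorem digitsOf_bounds (m : Int) : ∀ d ∈ digitsOf m, 0 ≤ d ∧ d < 10 := by
  fun_induction digitsOf m with
  | case1 m h ih =>
    intro d hd
    rcases List.mem_cons.mp hd with rfl | hd
    · exact ⟨PySem.Int.mod_nonneg m (by norm_num), PySem.Int.mod_lt m (by norm_num)⟩
    · exact ih d hd
  | case2 m h => intro d hd; simp at hd

theorem dbadLoop_iff (orig m : Int) :
    dbadLoop orig m = true ↔ ∀ d ∈ digitsOf m, d ≠ 0 ∧ d ∣ orig := by
  fun_induction dbadLoop orig m with
  | case1 m h digit hcond =>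
    rw [digitsOf, if_pos h]
    constructor
    · intro hfalse; exact absurd hfalse Bool.false_ne_true
    · intro hall
      exfalso
      have hhead := hall (PySem.Int.mod m 10) (List.mem_cons_self ..)
      rcases hcond with h0 | hmod
      · exact hhead.1 h0
      · exact hmod ((PySem.Int.mod_eq_zero_iff_dvd orig (PySem.Int.mod m 10)).mpr hhead.2)
  | case2 m h digit hcond ih =>
    rw [digitsOf, if_pos h, ih]
    simp only [not_or, not_not] at hcond
    constructor
    · intro hall d hd
      rcases List.mem_cons.mp hd with rfl | hd
      · exact ⟨hcond.1, (PySem.Int.mod_eq_zero_iff_dvd orig (PySem.Int.mod m 10)).mp hcond.2⟩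
      · exact hall d hd
    · intro hall d hd
      exact hall d (List.mem_cons_of_mem _ hd)
  | case3 m h =>
    rw [digitsOf, if_neg h]
    simp

theorem dbadGcd_eq (a b : Int) : 0 ≤ a → 0 ≤ b → dbadGcd a b = (Int.gcd a b : Int) := by
  fun_induction dbadGcd a b with
  | case1 a =>
    intro ha _
    rw [show Int.gcd a 0 = a.natAbs by simp [Int.gcd]]
    exact (Int.natAbs_of_nonneg ha).symm
  | case2 a b =>
    rename_i hb ih
    intro ha hb'
    have hbpos : 0 < b := lt_of_le_of_ne hb' (Ne.symm hb)
    rw [PySem.Int.mod_eq_emod_of_pos hbpos] at ih ⊢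
    rw [ih hbpos.le (Int.emod_nonneg a hb)]
    congr 1
    have ha2 : a = ((a.natAbs : Nat) : Int) := (Int.natAbs_of_nonneg ha).symm
    have hb2 : b = ((b.natAbs : Nat) : Int) := (Int.natAbs_of_nonneg hbpos.le).symm
    have hmm : a % b = ((a.natAbs % b.natAbs : Nat) : Int) := by
      conv_lhs => rw [ha2, hb2]
      push_cast
      ring
    rw [hmm]
    conv_lhs => rw [hb2]
    conv_rhs => rw [ha2, hb2]
    rw [Int.gcd_natCast_natCast, Int.gcd_natCast_natCast]
    simp only [Int.natAbs_natCast]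
    rw [Nat.gcd_comm b.natAbs, ← Nat.gcd_rec b.natAbs a.natAbs, Nat.gcd_comm b.natAbs]

theorem step_lcm (l d : Int) (hl : 0 < l) (hd : 0 < d) :
    PySem.Int.floordiv (l * d) (dbadGcd l d) = (Nat.lcm l.natAbs d.natAbs : Int) := by
  have hg : dbadGcd l d = (Int.gcd l d : Int) := dbadGcd_eq l d hl.le hd.le
  have hgpos : 0 < Int.gcd l d := Int.gcd_pos_iff.mpr (Or.inl (by omega))
  rw [hg, PySem.Int.floordiv_eq_ediv_of_pos (by exact_mod_cast hgpos)]
  have hgeq : Int.gcd l d = Nat.gcd l.natAbs d.natAbs := rfl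
  have hmul : l * d = ((Int.gcd l d * Nat.lcm l.natAbs d.natAbs : Nat) : Int) := by
    rw [hgeq, Nat.gcd_mul_lcm, Nat.cast_mul,
       Int.natAbs_of_nonneg hl.le, Int.natAbs_of_nonneg hd.le]
  rw [hmul, Nat.cast_mul]
  exact Int.mul_ediv_cancel_left _ (by exact_mod_cast hgpos.ne')

theorem fold_lcm_inv (ds : List Int) : ∀ (l : Int), 0 < l → (∀ d ∈ ds, 0 < d) →
    0 < ds.foldl (fun l d => PySem.Int.floordiv (l * d) (dbadGcd l d)) l ∧
    ∀ n : Int, ds.foldl (fun l d => PySem.Int.floordiv (l * d) (dbadGcd l d)) l ∣ n ↔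
      (l ∣ n ∧ ∀ d ∈ ds, d ∣ n) := by
  induction ds with
  | nil => intro l hl _; exact ⟨hl, fun n => by simp⟩
  | cons d ds ih =>
    intro l hl hds
    have hd : 0 < d := hds d (List.mem_cons_self ..)
    have hstep := step_lcm l d hl hd
    have hLpos : (0 : Int) < (Nat.lcm l.natAbs d.natAbs : Int) := by
      have : 0 < Nat.lcm l.natAbs d.natAbs :=
        Nat.pos_of_ne_zero (Nat.lcm_ne_zero (by omega) (by omega))
      exact_mod_cast this
    have ih' := ih _ hLpos (fun d hd => hds d (List.mem_cons_of_mem _ hd))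
    simp only [List.foldl_cons, hstep]
    refine ⟨ih'.1, fun n => ?_⟩
    rw [(ih'.2 n)]
    have hLdvd : ((Nat.lcm l.natAbs d.natAbs : Int) ∣ n) ↔ (l ∣ n ∧ d ∣ n) := by
      rw [← Int.dvd_natAbs, Int.natCast_dvd_natCast]
      constructor
      · intro h
        exact ⟨Int.natAbs_dvd_natAbs.mp ((Nat.dvd_lcm_left _ _).trans h),
               Int.natAbs_dvd_natAbs.mp ((Nat.dvd_lcm_right _ _).trans h)⟩
      · rintro ⟨h1, h2⟩
        exact Nat.lcm_dvd (Int.natAbs_dvd_natAbs.mpr h1) (Int.natAbs_dvd_natAbs.mpr h2)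
    rw [hLdvd]
    constructor
    · rintro ⟨⟨h1, h2⟩, h3⟩
      refine ⟨h1, fun e he => ?_⟩
      rcases List.mem_cons.mp he with rfl | he
      · exact h2
      · exact h3 e he
    · rintro ⟨h1, h2⟩
      exact ⟨⟨h1, h2 d (List.mem_cons_self ..)⟩, fun e he => h2 e (List.mem_cons_of_mem _ he)⟩

-- ===== VERDICT (by name: the statement is the Claim_ definition above) =====
theorem divides_by_all_digits_spec : Claim_equal_divides_by_all_digits := by
  intro n _
  unfold Spec_divides_by_all_digits divides_by_all_digits divides_by_all_digits_alt
  by_cases hn : n ≤ 0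
  · rw [dbadLoop, if_neg (show ¬(0 < n) by omega), if_pos hn]
  · replace hn : 0 < n := by omega
    simp only [show ¬(n ≤ 0) by omega, if_false]
    rw [dbadDigits_eq, List.nil_append]
    by_cases hz : (digitsOf n).contains 0
    · rw [if_pos hz]
      rcases List.contains_iff_exists_mem_beq.mp hz with ⟨d, hd, hdeq⟩
      have hd0 : d = 0 := by
        have : (0 : Int) = d := by simpa using hdeq
        omega
      cases hA : dbadLoop n n with
      | false => rfl
      | true =>
        have := (dbadLoop_iff n n).mp hA d hd
        exact absurd hd0 this.1
    · rw [if_neg hz]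
      have hnz : ∀ d ∈ digitsOf n, d ≠ 0 := by
        intro d hd hd0
        exact hz (List.contains_iff_exists_mem_beq.mpr ⟨d, hd, by simp [hd0]⟩)
      have hpos : ∀ d ∈ digitsOf n, 0 < d := by
        intro d hd
        have h1 := (digitsOf_bounds n d hd).1
        have h2 := hnz d hd
        omega
      have hfold := fold_lcm_inv (digitsOf n) 1 (by norm_num) hpos
      rw [Bool.eq_iff_iff, dbadLoop_iff, beq_iff_eq, PySem.Int.mod_eq_zero_iff_dvd, hfold.2 n]
      constructor
      · intro hall
        exact ⟨one_dvd n, fun d hd => (hall d hd).2⟩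
      · rintro ⟨_, hall⟩ d hd
        exact ⟨hnz d hd, hall d hd⟩
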